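-- pv_equiv track=rewrite | github.com/sirmick/mac-phoenix | tools/disasm_rom.py | decode_movem_regs
-- ===== SOURCE A (Python) =====
-- def decode_movem_regs(mask, direction):
--     """Decode MOVEM register list."""
--     regs = []
--     if direction:  # predecrement: reversed
--         for i in range(8):
--             if mask & (1 << (15 - i)):
--                 regs.append(f'd{i}')
--         for i in range(8):
--             if mask & (1 << (7 - i)):
--                 regs.append(f'a{i}')
--     else:
--         for i in range(8):
--             if mask & (1 << i):
--                 regs.append(f'd{i}')
--         for i in range(8):
--             if mask & (1 << (i + 8)):
--                 regs.append(f'a{i}')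
--     # Compress ranges
--     return '/'.join(regs) if regs else '???'
-- ===== SOURCE B (Python) =====
-- def _bits(m, j):
--     """Ascending indices (offset j) of the set bits of m (m >= 0), by halving."""
--     if m == 0:
--         return []
--     rest = _bits(m // 2, j + 1)
--     return [j] + rest if m % 2 else rest
--
--
-- def decode_movem_regs(mask, direction):
--     """Decode MOVEM register list via the set-bit indices of mask mod 2**16."""
--     bits = _bits(mask % 65536, 0)
--     if direction:
--         names = [('d' + str(15 - b)) if b >= 8 else ('a' + str(7 - b))
--                  for b in reversed(bits)]
--     else:
--         names = [('d' + str(b)) if b < 8 else ('a' + str(b - 8))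
--                  for b in bits]
--     return '/'.join(names) if names else '???'
-- ===== Notes on version B (the rewrite author's own statement) =====
-- stated objective: alternative
-- what changed: Instead of A's four fixed 8-iteration shift-and-test loops, B reduces the mask mod 2**16 and recursively halves that value to collect the ascending indices of its set bits (stopping as soon as the value is exhausted), then maps that index list (reversed for the predecrement direction) to register names in a separate stage.
import Mathlib
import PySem

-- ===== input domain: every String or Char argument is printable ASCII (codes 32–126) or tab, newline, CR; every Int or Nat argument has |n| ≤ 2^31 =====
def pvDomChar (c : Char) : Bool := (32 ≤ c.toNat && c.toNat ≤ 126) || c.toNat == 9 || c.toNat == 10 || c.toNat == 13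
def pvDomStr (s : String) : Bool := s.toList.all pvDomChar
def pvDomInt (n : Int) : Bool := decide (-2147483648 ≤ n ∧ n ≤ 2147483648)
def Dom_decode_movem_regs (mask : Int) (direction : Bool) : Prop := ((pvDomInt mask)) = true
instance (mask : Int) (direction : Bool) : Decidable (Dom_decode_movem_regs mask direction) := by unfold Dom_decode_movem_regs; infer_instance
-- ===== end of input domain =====

-- B decodes via the set-bit indices of mask mod 2^16, collected by recursive halving, then a
-- separate name-mapping (reversed for predecrement) stage (objective: alternative); same value everywhere.

-- ===== PORT A =====
def decode_movem_regs (mask : Int) (direction : Bool) : String :=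
  let regs : List String := []
  let regs :=
    if direction then
      let regs := (PySem.List.pyRange 0 8 1).foldl (fun acc i =>
        if PySem.Int.band mask (1 <<< (15 - i).toNat) ≠ 0 then acc ++ ["d" ++ PySem.Int.toStr i] else acc) regs
      (PySem.List.pyRange 0 8 1).foldl (fun acc i =>
        if PySem.Int.band mask (1 <<< (7 - i).toNat) ≠ 0 then acc ++ ["a" ++ PySem.Int.toStr i] else acc) regs
    else
      let regs := (PySem.List.pyRange 0 8 1).foldl (fun acc i =>
        if PySem.Int.band mask (1 <<< i.toNat) ≠ 0 then acc ++ ["d" ++ PySem.Int.toStr i] else acc) regs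
      (PySem.List.pyRange 0 8 1).foldl (fun acc i =>
        if PySem.Int.band mask (1 <<< (i + 8).toNat) ≠ 0 then acc ++ ["a" ++ PySem.Int.toStr i] else acc) regs
  if regs ≠ [] then PySem.Str.join "/" regs else "???"

-- ===== PORT B =====
-- _bits(m, j): m is always ≥ 0 in B (it is called with mask % 65536 and halved), so it is
-- represented as a Nat — exact for every reachable call.
def pvBits (m : Nat) (j : Int) : List Int :=
  if m = 0 then []
  else
    let rest := pvBits (m / 2) (j + 1)
    if m % 2 ≠ 0 then j :: rest else rest
decreasing_by omega

def decode_movem_regs_alt (mask : Int) (direction : Bool) : String :=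
  let bits := pvBits (PySem.Int.mod mask 65536).toNat 0
  let names : List String :=
    if direction then
      bits.reverse.map (fun b =>
        if b ≥ 8 then "d" ++ PySem.Int.toStr (15 - b) else "a" ++ PySem.Int.toStr (7 - b))
    else
      bits.map (fun b =>
        if b < 8 then "d" ++ PySem.Int.toStr b else "a" ++ PySem.Int.toStr (b - 8))
  if names ≠ [] then PySem.Str.join "/" names else "???"

-- ===== PRECONDITION & SPEC =====
def Spec_decode_movem_regs (mask : Int) (direction : Bool) (out : String) : Prop := out = decode_movem_regs_alt mask direction
instance (mask : Int) (direction : Bool) (out : String) : Decidable (Spec_decode_movem_regs mask direction out) := by unfold Spec_decode_movem_regs; infer_instance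

-- ===== CLAIM (what is proved, stated in full; the proofs are below) =====
def Claim_equal_decode_movem_regs : Prop := ∀ (mask : Int) (direction : Bool), Dom_decode_movem_regs mask direction → Spec_decode_movem_regs mask direction (decode_movem_regs mask direction)

-- ===== LEMMAS AND PROOFS =====

theorem pyRange_08 : PySem.List.pyRange 0 8 1 = ([0,1,2,3,4,5,6,7] : List Int) := by decide

-- glue: turn an iff between a Prop and a Bool into an equality of decide with that Bool
theorem pv_decide_eq_of_iff {c : Prop} [Decidable c] {b : Bool} (h : c ↔ b = true) : decide c = b := by
  cases b <;> simp_all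

-- characterization of the halving recursion: ascending set-bit indices, offset by j
theorem pvBits_char : ∀ (k m : Nat) (j : Int), m < 2 ^ k →
    pvBits m j = ((List.range k).filter m.testBit).map (fun b : Nat => j + (b : Int)) := by
  intro k
  induction k with
  | zero => intro m j hm; interval_cases m; simp [pvBits]
  | succ k ih =>
    intro m j hm
    by_cases h0 : m = 0
    · subst h0; simp [pvBits, Nat.zero_testBit]
    · rw [pvBits, if_neg h0]
      have hdiv : m / 2 < 2 ^ k := by
        have : (2:Nat) ^ (k+1) = 2 ^ k * 2 := by ring
        omega
      rw [ih (m / 2) (j + 1) hdiv]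
      have hcomp : (m.testBit ∘ Nat.succ) = (m / 2).testBit := by
        funext b; simp [Function.comp, Nat.testBit_div_two]
      have h0bit : m.testBit 0 = decide (m % 2 ≠ 0) := by
        rw [Nat.testBit_eq_decide_div_mod_eq]
        cases hd : decide (m % 2 ≠ 0) <;> simp_all
      have hmapsucc : ∀ (l : List Nat),
          (l.map Nat.succ).map (fun b : Nat => j + (b : Int)) = l.map (fun b : Nat => (j + 1) + (b : Int)) := by
        intro l
        rw [List.map_map]
        apply List.map_congr_left
        intro a _
        simp [Function.comp, Nat.succ_eq_add_one]
        ring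
      rw [List.range_succ_eq_map, List.filter_cons, List.filter_map, hcomp, h0bit]
      by_cases hm2 : m % 2 ≠ 0
      · rw [if_pos hm2, if_pos (by simpa using hm2), List.map_cons, hmapsucc]
        congr 1
        push_cast
        ring
      · rw [if_neg hm2, if_neg (by simpa using hm2), hmapsucc]

-- 16-bit window: complementing within 16 bits flips each low bit
theorem pv_testBit_compl (r b : Nat) (hr : r < 65536) (hb : b < 16) :
    Nat.testBit (65535 - r) b = !r.testBit b := by
  rw [Nat.testBit_eq_decide_div_mod_eq, Nat.testBit_eq_decide_div_mod_eq]
  interval_cases b <;> (cases hd : decide (r / _ % 2 = 1) <;> simp_all <;> omega)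

-- the bridge: A's bit test on mask equals the corresponding bit of (mask % 2^16)
theorem pv_test_eq (mask : Int) (b : Nat) (hb : b < 16) :
    (PySem.Int.band mask ((1:Int) <<< b) ≠ 0) ↔ (PySem.Int.mod mask 65536).toNat.testBit b = true := by
  have hsh : (1:Int) <<< b = ((2 ^ b : Nat) : Int) := by rw [Int.shiftLeft_eq]; push_cast; ring
  have hpow : (0:Nat) < 2 ^ b := by positivity
  by_cases hm : 0 ≤ mask
  · -- nonnegative mask
    have hmask : mask = ((mask.toNat : Nat) : Int) := by omega
    rw [PySem.Int.band_of_nonneg hm (by rw [hsh]; positivity), hsh]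
    have h1 : (((2 ^ b : Nat) : Int)).toNat = 2 ^ b := by omega
    rw [h1]
    have h2 : (PySem.Int.mod mask 65536).toNat = mask.toNat % 65536 := by
      rw [hmask, show ((65536:Int)) = ((65536:Nat):Int) from rfl, PySem.Int.mod_natCast]; omega
    rw [h2, show (65536:Nat) = 2 ^ 16 from rfl, Nat.testBit_mod_two_pow, Nat.and_two_pow]
    cases ht : mask.toNat.testBit b <;> simp [hb]
  · -- negative mask: mask = -(k + 1) with k = (-mask - 1).toNat
    have hk : mask = -(((-mask - 1).toNat : Nat) : Int) - 1 := by omega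
    have hband : PySem.Int.band mask ((1:Int) <<< b) =
        ((2 ^ b - (2 ^ b &&& (-mask - 1).toNat) : Nat) : Int) := by
      rw [hsh, PySem.Int.band, if_neg hm, if_pos (by positivity)]
      rw [show (((2 ^ b : Nat) : Int)).toNat = 2 ^ b from by omega]
    have hmod : (PySem.Int.mod mask 65536).toNat = 65535 - (-mask - 1).toNat % 65536 := by
      rw [PySem.Int.mod_eq_emod_of_pos (by norm_num)]
      omega
    rw [hband, hmod,
        pv_testBit_compl ((-mask - 1).toNat % 65536) b (by omega) hb,
        show (65536:Nat) = 2 ^ 16 from rfl, Nat.testBit_mod_two_pow,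
        Nat.land_comm, Nat.and_two_pow]
    cases ht : (-mask - 1).toNat.testBit b <;> simp [hb]

-- filter/map congruence along a common list (glue for the re-indexing below)
theorem pv_map_filter_congr {α β : Type} (l : List α) (p q : α → Bool) (f g : α → β)
    (hpq : ∀ x ∈ l, p x = q x) (hfg : ∀ x ∈ l, f x = g x) :
    (l.filter p).map f = (l.filter q).map g := by
  rw [List.filter_congr hpq]
  exact List.map_congr_left (fun a ha => hfg a (List.mem_of_mem_filter ha))

-- A's two ascending passes equal B's mapped ascending bit list (direction = false)
theorem pv_regs_false (mask : Int) :
    (([0,1,2,3,4,5,6,7] : List Int).filter (fun i => decide (PySem.Int.band mask (1 <<< i.toNat) ≠ 0))).map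
        (fun i => "d" ++ PySem.Int.toStr i)
      ++ (([0,1,2,3,4,5,6,7] : List Int).filter (fun i => decide (PySem.Int.band mask (1 <<< (i + 8).toNat) ≠ 0))).map
        (fun i => "a" ++ PySem.Int.toStr i)
    = (((List.range 16).filter (PySem.Int.mod mask 65536).toNat.testBit).map (fun b : Nat => (b : Int))).map
        (fun b => if b < 8 then "d" ++ PySem.Int.toStr b else "a" ++ PySem.Int.toStr (b - 8)) := by
  have e8 : ([0,1,2,3,4,5,6,7] : List Int) = (List.range 8).map (fun n : Nat => (n : Int)) := by decide
  simp only [e8, List.filter_map, List.map_map, show (16:Nat) = 8 + 8 from rfl, List.range_add,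
      List.filter_append, List.map_append]
  congr 1
  · apply pv_map_filter_congr
    · intro n hn
      have hn8 : n < 8 := List.mem_range.mp hn
      simp only [Function.comp, Int.toNat_natCast]
      exact pv_decide_eq_of_iff (pv_test_eq mask n (by omega))
    · intro n hn
      have hn8 : n < 8 := List.mem_range.mp hn
      simp only [Function.comp]
      rw [if_pos (by exact_mod_cast hn8)]
  · apply pv_map_filter_congr
    · intro n hn
      have hn8 : n < 8 := List.mem_range.mp hn
      simp only [Function.comp]
      have h1 : ((n : Int) + 8).toNat = n + 8 := by omega
      rw [h1, Nat.add_comm 8 n]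
      exact pv_decide_eq_of_iff (pv_test_eq mask (n + 8) (by omega))
    · intro n hn
      simp only [Function.comp]
      rw [if_neg (by omega), show (((8 + n : Nat) : Int)) - 8 = (n : Int) by omega]

-- A's two descending passes equal B's mapped reversed bit list (direction = true)
theorem pv_regs_true (mask : Int) :
    (([0,1,2,3,4,5,6,7] : List Int).filter (fun i => decide (PySem.Int.band mask (1 <<< (15 - i).toNat) ≠ 0))).map
        (fun i => "d" ++ PySem.Int.toStr i)
      ++ (([0,1,2,3,4,5,6,7] : List Int).filter (fun i => decide (PySem.Int.band mask (1 <<< (7 - i).toNat) ≠ 0))).map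
        (fun i => "a" ++ PySem.Int.toStr i)
    = ((((List.range 16).filter (PySem.Int.mod mask 65536).toNat.testBit).map (fun b : Nat => (b : Int))).reverse).map
        (fun b => if b ≥ 8 then "d" ++ PySem.Int.toStr (15 - b) else "a" ++ PySem.Int.toStr (7 - b)) := by
  have e8 : ([0,1,2,3,4,5,6,7] : List Int) = (List.range 8).map (fun n : Nat => (n : Int)) := by decide
  have erev : (List.range 16).reverse =
      (List.range 8).map (fun n => 15 - n) ++ (List.range 8).map (fun n => 7 - n) := by decide
  rw [← List.map_reverse, ← List.filter_reverse, erev]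
  simp only [e8, List.filter_map, List.map_map, List.filter_append, List.map_append]
  congr 1
  · apply pv_map_filter_congr
    · intro n hn
      have hn8 : n < 8 := List.mem_range.mp hn
      simp only [Function.comp]
      have h1 : ((15:Int) - (n : Int)).toNat = 15 - n := by omega
      rw [h1]
      exact pv_decide_eq_of_iff (pv_test_eq mask (15 - n) (by omega))
    · intro n hn
      have hn8 : n < 8 := List.mem_range.mp hn
      simp only [Function.comp]
      rw [if_pos (by omega), show (15:Int) - (((15 - n : Nat) : Int)) = (n : Int) by omega]
  · apply pv_map_filter_congr
    · intro n hn
      have hn8 : n < 8 := List.mem_range.mp hn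
      simp only [Function.comp]
      have h1 : ((7:Int) - (n : Int)).toNat = 7 - n := by omega
      rw [h1]
      exact pv_decide_eq_of_iff (pv_test_eq mask (7 - n) (by omega))
    · intro n hn
      have hn8 : n < 8 := List.mem_range.mp hn
      simp only [Function.comp]
      rw [if_neg (by omega), show (7:Int) - (((7 - n : Nat) : Int)) = (n : Int) by omega]

-- ===== VERDICT (by name: the statement is the Claim_ definition above) =====
theorem decode_movem_regs_spec : Claim_equal_decode_movem_regs := by
  intro mask direction _
  unfold Spec_decode_movem_regs
  have hnn : 0 ≤ PySem.Int.mod mask 65536 := PySem.Int.mod_nonneg mask (by norm_num)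
  have hlt : PySem.Int.mod mask 65536 < 65536 := PySem.Int.mod_lt mask (by norm_num)
  have hNlt : (PySem.Int.mod mask 65536).toNat < 2 ^ 16 := by omega
  have hbits0 : pvBits (PySem.Int.mod mask 65536).toNat 0 =
      ((List.range 16).filter (PySem.Int.mod mask 65536).toNat.testBit).map (fun b : Nat => (b : Int)) := by
    rw [pvBits_char 16 _ 0 hNlt]
    exact List.map_congr_left (fun a _ => by ring)
  cases direction
  · simp only [decode_movem_regs, decode_movem_regs_alt, pyRange_08, Bool.false_eq_true,
      if_false, PySem.List.foldl_append_ite, List.nil_append, hbits0]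
    rw [pv_regs_false mask]
  · simp only [decode_movem_regs, decode_movem_regs_alt, pyRange_08,
      if_true, PySem.List.foldl_append_ite, List.nil_append, hbits0]
    rw [pv_regs_true mask]
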